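-- pv_equiv track=rewrite | github.com/Azothyr/CS_Archive | Python/PythonScripts/CS1400_Spring2023/Assignments/StringExcercises.py | find_longest_string_and_freq
-- ===== SOURCE A (Python) =====
-- def find_longest_string_and_freq(string):
--   words = string.split()
--
--   longest_word = ""
--   longest_word_freq = 0
--
--   word_freq = {}
--   for word in words:
--     if len(word) > len(longest_word):
--       longest_word = word
--   longest_word_freq = words.count(longest_word)
--   return (longest_word, longest_word_freq)
-- ===== SOURCE B (Python) =====
-- def find_longest_string_and_freq(string):
--     words = string.split()
--     if not words:
--         return ("", 0)
--     ordered = sorted(words, key=len, reverse=True)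
--     longest_word = ordered[0]
--     return (longest_word, words.count(longest_word))
-- ===== Notes on version B (the rewrite author's own statement) =====
-- stated objective: alternative
-- what changed: Replaces A's linear argmax scan (running best-so-far with an unused dict) by an empty guard plus a stable length-descending sort whose first element is the longest word; frequency is still counted on the original word list.
import Mathlib
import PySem

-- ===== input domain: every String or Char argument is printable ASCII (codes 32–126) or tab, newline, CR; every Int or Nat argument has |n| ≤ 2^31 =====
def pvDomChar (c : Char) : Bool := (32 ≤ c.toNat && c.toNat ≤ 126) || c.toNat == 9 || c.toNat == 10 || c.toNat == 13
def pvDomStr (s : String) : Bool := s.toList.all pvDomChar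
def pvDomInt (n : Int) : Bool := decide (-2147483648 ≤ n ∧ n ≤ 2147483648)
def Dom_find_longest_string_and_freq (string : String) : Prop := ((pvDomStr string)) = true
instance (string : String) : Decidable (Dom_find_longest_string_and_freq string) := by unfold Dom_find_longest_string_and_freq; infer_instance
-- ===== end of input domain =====

-- ===== PORT A =====
-- B replaces A's running-best scan with a guard plus a stable length-descending sort; same values everywhere (objective: alternative).
def find_longest_string_and_freq (string : String) : String × Int :=
  let words := PySem.Str.split₀ string
  let longest_word :=
    words.foldl (fun longest_word word =>
      if PySem.Str.len word > PySem.Str.len longest_word then word else longest_word) ""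
  let longest_word_freq : Int := (PySem.List.count words longest_word : Int)
  (longest_word, longest_word_freq)

-- ===== PORT B =====
def find_longest_string_and_freq_alt (string : String) : String × Int :=
  let words := PySem.Str.split₀ string
  if words = [] then ("", 0)
  else
    let ordered := PySem.List.sorted words PySem.Str.len true
    let longest_word := (PySem.List.pyGet? ordered 0).getD ""  -- ordered[0]; ordered ≠ [] under the guard
    (longest_word, (PySem.List.count words longest_word : Int))

-- ===== PRECONDITION & SPEC =====
def Spec_find_longest_string_and_freq (string : String) (out : String × Int) : Prop := out = find_longest_string_and_freq_alt string
instance (string : String) (out : String × Int) : Decidable (Spec_find_longest_string_and_freq string out) := by unfold Spec_find_longest_string_and_freq; infer_instance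

-- ===== CLAIM (what is proved, stated in full; the proofs are below) =====
def Claim_equal_find_longest_string_and_freq : Prop := ∀ (string : String), Dom_find_longest_string_and_freq string → Spec_find_longest_string_and_freq string (find_longest_string_and_freq string)

-- ===== LEMMAS AND PROOFS =====

-- Unfold steps of PySem.List.insertBy (definitional).
theorem insertBy_nil (bef : String → String → Bool) (x : String) :
    PySem.List.insertBy bef x [] = [x] := rfl

theorem insertBy_cons (bef : String → String → Bool) (x y : String) (ys : List String) :
    PySem.List.insertBy bef x (y :: ys) =
      if bef x y then x :: y :: ys else y :: PySem.List.insertBy bef x ys := rfl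

-- The head of the stable reverse insertion-sort accumulator evolves exactly like A's running best.
theorem head_foldl_insertBy (ws : List String) (h : String) (t : List String) :
    (ws.foldl (fun acc x =>
        PySem.List.insertBy (fun a b => decide (PySem.Str.len b < PySem.Str.len a)) x acc) (h :: t)).head? =
      some (ws.foldl (fun longest_word word =>
        if PySem.Str.len word > PySem.Str.len longest_word then word else longest_word) h) := by
  induction ws generalizing h t with
  | nil => rfl
  | cons w ws ih =>
      rw [List.foldl_cons, List.foldl_cons, insertBy_cons]
      by_cases hc : PySem.Str.len h < PySem.Str.len w
      · rw [if_pos (decide_eq_true hc), if_pos (show PySem.Str.len w > PySem.Str.len h from hc)]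
        exact ih w (h :: t)
      · rw [if_neg (by simpa using hc), if_neg (show ¬ PySem.Str.len w > PySem.Str.len h from hc)]
        exact ih h _

-- A string of length 0 is the empty string, so A's "" seed is replaced by the first word either way.
theorem first_step_eq (w : String) :
    (if PySem.Str.len w > PySem.Str.len "" then w else "") = w := by
  by_cases hc : PySem.Str.len w > PySem.Str.len ""
  · rw [if_pos hc]
  · rw [if_neg hc]
    have h0 : w.toList.length = 0 := by
      simp only [gt_iff_lt, PySem.Str.len_eq, String.toList_empty, List.length_nil,
        Nat.cast_zero] at hc
      omega
    exact (String.toList_eq_nil_iff.mp (List.length_eq_zero_iff.mp h0)).symm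

theorem find_longest_string_and_freq_spec : Claim_equal_find_longest_string_and_freq := by
  intro s _
  unfold Spec_find_longest_string_and_freq
  cases hw : PySem.Str.split₀ s with
  | nil =>
      simp [find_longest_string_and_freq, find_longest_string_and_freq_alt, hw,
        PySem.List.count_eq]
  | cons w ws =>
      simp only [find_longest_string_and_freq, find_longest_string_and_freq_alt, hw,
        reduceCtorEq, if_false, List.foldl_cons, first_step_eq,
        PySem.List.sorted_rev_eq_foldl_insertBy, insertBy_nil]
      have hhead := head_foldl_insertBy ws w []
      cases hfold : (ws.foldl (fun acc x =>
          PySem.List.insertBy (fun a b => decide (PySem.Str.len b < PySem.Str.len a)) x acc) [w]) with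
      | nil => rw [hfold] at hhead; simp at hhead
      | cons m t =>
          rw [hfold] at hhead
          rw [List.head?_cons, Option.some_inj] at hhead
          rw [PySem.List.pyGet?_zero_cons, Option.getD_some, hhead]
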